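-- pv_equiv track=rewrite | github.com/ycanay/HI-SLAM2 | scripts/pq_new.py | color_to_instance_id
-- ===== SOURCE A (Python) =====
-- def color_to_instance_id(rgb):
--     """
--     Convert a single RGB color to instance ID using bit-interleaving scheme.
--
--     The encoding scheme used by Replica dataset:
--     - R channel bits [7,6,5,4,3,2,1,0] correspond to instance ID bits [0,3,6,9,12,15,18,21]
--     - G channel bits [7,6,5,4,3,2,1,0] correspond to instance ID bits [1,4,7,10,13,16,19,22]
--     - B channel bits [7,6,5,4,3,2,1,0] correspond to instance ID bits [2,5,8,11,14,17,20,23]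
--
--     Args:
--         rgb: tuple or array of (R, G, B) values, each in range [0, 255]
--
--     Returns:
--         int: instance ID decoded from the color
--     """
--     r, g, b = int(rgb[0]), int(rgb[1]), int(rgb[2])
--
--     instance_id = 0
--     for bit_pos in range(8):
--         # Extract bit from each channel (from MSB to LSB)
--         color_bit = 7 - bit_pos  # Color channel bit position
--         id_bit_base = bit_pos * 3  # Base ID bit position
--
--         r_bit = (r >> color_bit) & 1
--         g_bit = (g >> color_bit) & 1
--         b_bit = (b >> color_bit) & 1
--
--         instance_id |= (r_bit << id_bit_base)
--         instance_id |= (g_bit << (id_bit_base + 1))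
--         instance_id |= (b_bit << (id_bit_base + 2))
--
--     return instance_id
-- ===== SOURCE B (Python) =====
-- def _rev8(x):
--     # reverse the 8 bits of a byte
--     x = ((x & 0xF0) >> 4) | ((x & 0x0F) << 4)
--     x = ((x & 0xCC) >> 2) | ((x & 0x33) << 2)
--     return ((x & 0xAA) >> 1) | ((x & 0x55) << 1)
--
--
-- def _spread3(x):
--     # spread the 8 bits of a byte to every third bit position (Morton)
--     x = (x | (x << 8)) & 0x00F00F
--     x = (x | (x << 4)) & 0x0C30C3
--     return (x | (x << 2)) & 0x249249
--
--
-- def color_to_instance_id(rgb):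
--     r, g, b = int(rgb[0]) & 0xFF, int(rgb[1]) & 0xFF, int(rgb[2]) & 0xFF
--     return _spread3(_rev8(r)) | (_spread3(_rev8(g)) << 1) | (_spread3(_rev8(b)) << 2)
-- ===== Notes on version B (the rewrite author's own statement) =====
-- stated objective: alternative
-- what changed: Replaces A's 8-iteration per-bit loop with a closed-form computation: mask each channel to its low byte, reverse the byte's bits with three mask-and-shift steps, then spread the bits to every third position with the standard Morton magic-mask sequence and OR the three channels together.
import Mathlib
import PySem

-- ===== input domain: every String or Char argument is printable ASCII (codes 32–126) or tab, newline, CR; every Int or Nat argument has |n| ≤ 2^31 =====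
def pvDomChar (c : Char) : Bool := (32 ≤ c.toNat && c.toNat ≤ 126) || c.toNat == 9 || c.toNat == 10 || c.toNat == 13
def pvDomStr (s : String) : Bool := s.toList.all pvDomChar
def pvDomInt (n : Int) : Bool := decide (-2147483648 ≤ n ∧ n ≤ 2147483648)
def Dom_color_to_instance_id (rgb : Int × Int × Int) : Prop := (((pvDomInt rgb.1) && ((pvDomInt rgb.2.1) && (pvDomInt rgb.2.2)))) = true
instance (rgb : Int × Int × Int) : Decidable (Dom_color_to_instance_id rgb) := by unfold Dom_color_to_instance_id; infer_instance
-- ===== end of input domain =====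

-- B replaces A's 8-iteration per-bit decoding loop by a closed-form byte bit-reversal
-- plus a Morton magic-mask bit-spread; objective: alternative (loop-free bit manipulation).

-- ===== PORT A =====
-- literal transliteration of A's per-bit loop; Python's int >>/<<//&/| are ported as
-- >>> / <<< (shift count : Nat) and PySem.Int.band / PySem.Int.bor (Python-exact)
def color_to_instance_id (rgb : Int × Int × Int) : Int :=
  let r := rgb.1
  let g := rgb.2.1
  let b := rgb.2.2
  (List.range 8).foldl (fun instance_id bit_pos =>
    let color_bit : Nat := 7 - bit_pos
    let id_bit_base : Nat := bit_pos * 3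
    let r_bit := PySem.Int.band (r >>> color_bit) 1
    let g_bit := PySem.Int.band (g >>> color_bit) 1
    let b_bit := PySem.Int.band (b >>> color_bit) 1
    PySem.Int.bor (PySem.Int.bor (PySem.Int.bor instance_id (r_bit <<< id_bit_base))
      (g_bit <<< (id_bit_base + 1))) (b_bit <<< (id_bit_base + 2))) 0

-- ===== PORT B =====
-- reverse the 8 bits of a byte (Source B _rev8)
def rev8 (x : Int) : Int :=
  let x1 := PySem.Int.bor ((PySem.Int.band x 0xF0) >>> (4:Nat)) ((PySem.Int.band x 0x0F) <<< (4:Nat))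
  let x2 := PySem.Int.bor ((PySem.Int.band x1 0xCC) >>> (2:Nat)) ((PySem.Int.band x1 0x33) <<< (2:Nat))
  PySem.Int.bor ((PySem.Int.band x2 0xAA) >>> (1:Nat)) ((PySem.Int.band x2 0x55) <<< (1:Nat))

-- spread the 8 bits of a byte to every third bit position (Source B _spread3)
def spread3 (x : Int) : Int :=
  let x1 := PySem.Int.band (PySem.Int.bor x (x <<< (8:Nat))) 0x00F00F
  let x2 := PySem.Int.band (PySem.Int.bor x1 (x1 <<< (4:Nat))) 0x0C30C3
  PySem.Int.band (PySem.Int.bor x2 (x2 <<< (2:Nat))) 0x249249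

def color_to_instance_id_alt (rgb : Int × Int × Int) : Int :=
  let r := PySem.Int.band rgb.1 0xFF
  let g := PySem.Int.band rgb.2.1 0xFF
  let b := PySem.Int.band rgb.2.2 0xFF
  PySem.Int.bor (PySem.Int.bor (spread3 (rev8 r)) ((spread3 (rev8 g)) <<< (1:Nat)))
    ((spread3 (rev8 b)) <<< (2:Nat))

-- ===== PRECONDITION & SPEC =====
def Spec_color_to_instance_id (rgb : Int × Int × Int) (out : Int) : Prop := out = color_to_instance_id_alt rgb
instance (rgb : Int × Int × Int) (out : Int) : Decidable (Spec_color_to_instance_id rgb out) := by unfold Spec_color_to_instance_id; infer_instance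

-- ===== CLAIM (what is proved, stated in full; the proofs are below) =====
def Claim_equal_color_to_instance_id : Prop := ∀ (rgb : Int × Int × Int), Dom_color_to_instance_id rgb → Spec_color_to_instance_id rgb (color_to_instance_id rgb)

-- ===== LEMMAS AND PROOFS =====

theorem shift_bit (x : Int) (k : Nat) (hk : k < 8) :
    (x >>> k) % 2 = ((x % 256) >>> k) % 2 := by
  rw [Int.shiftRight_eq_div_pow, Int.shiftRight_eq_div_pow]
  have h2 : (2:Int) * 2^(7-k) * 2^k = 256 := by
    rw [mul_assoc, ← pow_add, show 7 - k + k = 7 by omega]; norm_num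
  have hx : x = x % 256 + (2 * 2^(7-k) * (x / 256)) * 2^k := by
    calc x = 256 * (x/256) + x % 256 := (Int.mul_ediv_add_emod x 256).symm
    _ = x % 256 + (2 * 2^(7-k) * 2^k) * (x/256) := by rw [h2]; ring
    _ = x % 256 + (2 * 2^(7-k) * (x / 256)) * 2^k := by ring
  conv_lhs => rw [hx]
  push_cast
  rw [Int.add_mul_ediv_right _ _ (by positivity : ((2:Int)^k) ≠ 0)]
  rw [mul_assoc, Int.add_mul_emod_self_left]

theorem natCast_shiftRight (m k : Nat) : ((m:Int) >>> k) = ((m >>> k : Nat) : Int) := rfl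
theorem natCast_shiftLeft (m k : Nat) : ((m:Int) <<< k) = ((m <<< k : Nat) : Int) := rfl

theorem bit_reduce (x : Int) (k : Nat) (hk : k < 8) :
    PySem.Int.band (x >>> k) 1 = (((((x % 256).toNat) >>> k) &&& 1 : Nat) : Int) := by
  have hnn : 0 ≤ x % 256 := Int.emod_nonneg x (by norm_num)
  set m := (x % 256).toNat with hm
  have hcast : x % 256 = (m : Int) := (Int.toNat_of_nonneg hnn).symm
  rw [PySem.Int.band_one, PySem.Int.mod_eq_emod_of_pos (by norm_num), shift_bit x k hk,
      hcast, natCast_shiftRight, Nat.and_one_is_mod]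
  omega

def rev8N (x : Nat) : Nat :=
  let x1 := ((x &&& 0xF0) >>> 4) ||| ((x &&& 0x0F) <<< 4)
  let x2 := ((x1 &&& 0xCC) >>> 2) ||| ((x1 &&& 0x33) <<< 2)
  ((x2 &&& 0xAA) >>> 1) ||| ((x2 &&& 0x55) <<< 1)

def spread3N (x : Nat) : Nat :=
  let x1 := (x ||| (x <<< 8)) &&& 0x00F00F
  let x2 := (x1 ||| (x1 <<< 4)) &&& 0x0C30C3
  (x2 ||| (x2 <<< 2)) &&& 0x249249

theorem spread_rev_cast (n : Nat) :
    spread3 (rev8 (n : Int)) = ((spread3N (rev8N n) : Nat) : Int) := by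
  simp only [rev8, spread3, rev8N, spread3N]
  simp only [← Nat.ToInt.natCast_ofNat, natCast_shiftRight, natCast_shiftLeft,
    PySem.Int.band_natCast, PySem.Int.bor_natCast]


def chanR (a : Nat) : Nat :=
  (((a >>> 7) &&& 1) <<< 0) ||| (((a >>> 6) &&& 1) <<< 3) ||| (((a >>> 5) &&& 1) <<< 6) |||
  (((a >>> 4) &&& 1) <<< 9) ||| (((a >>> 3) &&& 1) <<< 12) ||| (((a >>> 2) &&& 1) <<< 15) |||
  (((a >>> 1) &&& 1) <<< 18) ||| (((a >>> 0) &&& 1) <<< 21)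

def chanG (a : Nat) : Nat :=
  (((a >>> 7) &&& 1) <<< 1) ||| (((a >>> 6) &&& 1) <<< 4) ||| (((a >>> 5) &&& 1) <<< 7) |||
  (((a >>> 4) &&& 1) <<< 10) ||| (((a >>> 3) &&& 1) <<< 13) ||| (((a >>> 2) &&& 1) <<< 16) |||
  (((a >>> 1) &&& 1) <<< 19) ||| (((a >>> 0) &&& 1) <<< 22)

def chanB (a : Nat) : Nat :=
  (((a >>> 7) &&& 1) <<< 2) ||| (((a >>> 6) &&& 1) <<< 5) ||| (((a >>> 5) &&& 1) <<< 8) |||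
  (((a >>> 4) &&& 1) <<< 11) ||| (((a >>> 3) &&& 1) <<< 14) ||| (((a >>> 2) &&& 1) <<< 17) |||
  (((a >>> 1) &&& 1) <<< 20) ||| (((a >>> 0) &&& 1) <<< 23)

set_option maxRecDepth 4096 in
theorem chanR_eq : ∀ a : Fin 256, chanR a.val = spread3N (rev8N a.val) := by decide
set_option maxRecDepth 4096 in
theorem chanG_eq : ∀ a : Fin 256, chanG a.val = spread3N (rev8N a.val) <<< 1 := by decide
set_option maxRecDepth 4096 in
theorem chanB_eq : ∀ a : Fin 256, chanB a.val = spread3N (rev8N a.val) <<< 2 := by decide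


theorem band255_eq_emod (x : Int) : PySem.Int.band x 255 = x % 256 := by
  unfold PySem.Int.band
  split_ifs with h1 h2 h2
  · rw [show ((255:Int).toNat) = 255 from rfl,
        show (255:Nat) = 2^8 - 1 from rfl, Nat.and_two_pow_sub_one_eq_mod,
        show (2:Nat)^8 = 256 from rfl]
    omega
  · omega
  · rw [show ((255:Int).toNat) = 255 from rfl, Nat.land_comm,
        show (255:Nat) = 2^8 - 1 from rfl, Nat.and_two_pow_sub_one_eq_mod,
        show (2:Nat)^8 = 256 from rfl]
    omega
  · omega

theorem lor_left_comm (a b c : Nat) : a ||| (b ||| c) = b ||| (a ||| c) := by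
  rw [← Nat.lor_assoc, Nat.lor_comm a b, Nat.lor_assoc]

theorem regroup (x0 x1 x2 x3 x4 x5 x6 x7 y0 y1 y2 y3 y4 y5 y6 y7 z0 z1 z2 z3 z4 z5 z6 z7 : Nat) :
    ((((((((((((((((((((((x0 ||| y0) ||| z0) ||| x1) ||| y1) ||| z1) ||| x2) ||| y2) ||| z2) |||
      x3) ||| y3) ||| z3) ||| x4) ||| y4) ||| z4) ||| x5) ||| y5) ||| z5) ||| x6) ||| y6) ||| z6)
      ||| x7) ||| y7) ||| z7 =
    ((x0 ||| x1 ||| x2 ||| x3 ||| x4 ||| x5 ||| x6 ||| x7) |||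
     (y0 ||| y1 ||| y2 ||| y3 ||| y4 ||| y5 ||| y6 ||| y7)) |||
     (z0 ||| z1 ||| z2 ||| z3 ||| z4 ||| z5 ||| z6 ||| z7) := by
  simp only [Nat.lor_assoc]
  simp [lor_left_comm]

set_option maxHeartbeats 2000000 in
theorem main_eq (rgb : Int × Int × Int) :
    color_to_instance_id rgb = color_to_instance_id_alt rgb := by
  obtain ⟨r, g, b⟩ := rgb
  have hnr : (r % 256).toNat < 256 := by omega
  have hng : (g % 256).toNat < 256 := by omega
  have hnb : (b % 256).toNat < 256 := by omega
  have hr : PySem.Int.band r 255 = (((r % 256).toNat : Nat) : Int) := by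
    rw [band255_eq_emod]; omega
  have hg : PySem.Int.band g 255 = (((g % 256).toNat : Nat) : Int) := by
    rw [band255_eq_emod]; omega
  have hb : PySem.Int.band b 255 = (((b % 256).toNat : Nat) : Int) := by
    rw [band255_eq_emod]; omega
  simp only [color_to_instance_id, color_to_instance_id_alt,
    show List.range 8 = [0,1,2,3,4,5,6,7] from rfl, List.foldl_cons, List.foldl_nil]
  norm_num only
  rw [hr, hg, hb,
      bit_reduce r 7 (by norm_num), bit_reduce r 6 (by norm_num), bit_reduce r 5 (by norm_num),
      bit_reduce r 4 (by norm_num), bit_reduce r 3 (by norm_num), bit_reduce r 2 (by norm_num),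
      bit_reduce r 1 (by norm_num), bit_reduce r 0 (by norm_num),
      bit_reduce g 7 (by norm_num), bit_reduce g 6 (by norm_num), bit_reduce g 5 (by norm_num),
      bit_reduce g 4 (by norm_num), bit_reduce g 3 (by norm_num), bit_reduce g 2 (by norm_num),
      bit_reduce g 1 (by norm_num), bit_reduce g 0 (by norm_num),
      bit_reduce b 7 (by norm_num), bit_reduce b 6 (by norm_num), bit_reduce b 5 (by norm_num),
      bit_reduce b 4 (by norm_num), bit_reduce b 3 (by norm_num), bit_reduce b 2 (by norm_num),
      bit_reduce b 1 (by norm_num), bit_reduce b 0 (by norm_num),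
      spread_rev_cast, spread_rev_cast, spread_rev_cast]
  rw [show ∀ y : Int, PySem.Int.bor 0 y = y from fun y => by
        rw [PySem.Int.bor_comm]; simp [pysem]]
  simp only [natCast_shiftLeft, PySem.Int.bor_natCast, Nat.cast_inj]
  rw [← chanR_eq ⟨(r % 256).toNat, hnr⟩, ← chanG_eq ⟨(g % 256).toNat, hng⟩,
      ← chanB_eq ⟨(b % 256).toNat, hnb⟩]
  simp only [chanR, chanG, chanB]
  exact regroup _ _ _ _ _ _ _ _ _ _ _ _ _ _ _ _ _ _ _ _ _ _ _ _

-- ===== VERDICT (by name: the statement is the Claim_ definition above) =====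
theorem color_to_instance_id_spec : Claim_equal_color_to_instance_id := by
  intro rgb _
  unfold Spec_color_to_instance_id
  exact main_eq rgb
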